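-- pv_equiv track=rewrite | github.com/OddmarRune/adventofcode | 2023/Dec13/dec13.py | check_vert
-- ===== SOURCE A (Python) =====
-- def check_vert(block, c = 0):
--     """Check if block is symmetric with horizontal mirror"""
--     if (len(block[0])-c)%2 == 1 or len(block[0])-1<=abs(c):
--         return 100
--     number = 0
--     for line in block:
--         if c >= 0:
--             number += sum([0 if line[i+c] == line[-1-i] else 1 for i in range((len(line)-c))])
--         else:
--             number += sum([0 if line[i] == line[-1-i+c] else 1 for i in range(len(line)+c)])
--     return number//2
-- ===== SOURCE B (Python) =====
-- def check_vert(block, c = 0):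
--     """Check if block is symmetric with horizontal mirror"""
--     width = len(block[0])
--     if (width - c) % 2 == 1 or width - 1 <= abs(c):
--         return 100
--     total = 0
--     for line in block:
--         w = line[c:] if c >= 0 else line[:max(len(line) + c, 0)]
--         h = len(w) // 2
--         total += sum(0 if a == b else 1 for a, b in zip(w[:h], w[h:][::-1]))
--     return total
-- ===== Notes on version B (the rewrite author's own statement) =====
-- stated objective: alternative
-- what changed: B slices each line's mirror window once, splits it in half and counts mismatches by zipping the first half against the reversed second half, so every mirrored pair is compared exactly once and the doubled count plus the final //2 of A disappear.
import Mathlib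
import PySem

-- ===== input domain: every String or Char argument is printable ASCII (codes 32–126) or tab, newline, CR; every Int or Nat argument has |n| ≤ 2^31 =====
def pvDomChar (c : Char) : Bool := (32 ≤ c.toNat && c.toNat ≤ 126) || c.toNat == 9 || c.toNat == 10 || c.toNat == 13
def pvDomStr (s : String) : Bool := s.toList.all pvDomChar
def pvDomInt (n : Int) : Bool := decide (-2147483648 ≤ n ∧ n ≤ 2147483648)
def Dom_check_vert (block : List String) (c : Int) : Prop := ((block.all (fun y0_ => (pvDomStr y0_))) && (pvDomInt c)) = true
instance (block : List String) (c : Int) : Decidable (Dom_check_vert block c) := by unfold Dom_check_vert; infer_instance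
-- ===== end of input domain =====

-- B restates the per-line mismatch count: it slices the mirror window, splits it in half and
-- compares the first half with the reversed second half once (zip), so no doubled count and no final //2.

-- ===== PORT A =====
-- the body of A's 'for line in block' loop (number += sum([...]))
def check_vert_lineA (c : Int) (number : Int) (line : String) : Int :=
  if c ≥ 0 then
    number + ((PySem.List.pyRange 0 (PySem.Str.len line - c) 1).map (fun i =>
      if PySem.Str.pyGet? line (i + c) == PySem.Str.pyGet? line (-1 - i) then (0:Int) else 1)).sum
  else
    number + ((PySem.List.pyRange 0 (PySem.Str.len line + c) 1).map (fun i =>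
      if PySem.Str.pyGet? line i == PySem.Str.pyGet? line (-1 - i + c) then (0:Int) else 1)).sum

def check_vert (block : List String) (c : Int) : Int :=
  -- block[0]: guarded by Pre_ (block ≠ []); pyGetD makes the port total
  if PySem.Int.mod (PySem.Str.len (PySem.List.pyGetD block 0 "") - c) 2 = 1 ∨
      PySem.Str.len (PySem.List.pyGetD block 0 "") - 1 ≤ |c| then 100
  else PySem.Int.floordiv (block.foldl (check_vert_lineA c) 0) 2

-- ===== PORT B =====
-- the body of B's loop: slice the window, compare first half with reversed second half
def check_vert_lineB (c : Int) (total : Int) (line : String) : Int :=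
  let w := if c ≥ 0 then PySem.List.slice line.toList (some c) none
           else PySem.List.slice line.toList none (some (max (PySem.Str.len line + c) 0))
  let h := w.length / 2
  total + (((w.take h).zip ((w.drop h).reverse)).map (fun p => if p.1 == p.2 then (0:Int) else 1)).sum

def check_vert_alt (block : List String) (c : Int) : Int :=
  if PySem.Int.mod (PySem.Str.len (PySem.List.pyGetD block 0 "") - c) 2 = 1 ∨
      PySem.Str.len (PySem.List.pyGetD block 0 "") - 1 ≤ |c| then 100
  else block.foldl (check_vert_lineB c) 0

-- ===== PRECONDITION & SPEC =====
-- Pre_ excludes only the empty block, on which A raises IndexError at block[0]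
def Pre_check_vert (block : List String) (c : Int) : Prop := block ≠ []
instance (block : List String) (c : Int) : Decidable (Pre_check_vert block c) := by unfold Pre_check_vert; infer_instance
def pvWitness_check_vert : List String × Int := (["##", "##"], 0)

def Spec_check_vert (block : List String) (c : Int) (out : Int) : Prop := out = check_vert_alt block c
instance (block : List String) (c : Int) (out : Int) : Decidable (Spec_check_vert block c out) := by unfold Spec_check_vert; infer_instance

-- ===== CLAIM (what is proved, stated in full; the proofs are below) =====
def Claim_equal_check_vert : Prop := ∀ (block : List String) (c : Int), Dom_check_vert block c → Pre_check_vert block c → Spec_check_vert block c (check_vert block c)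

-- ===== LEMMAS AND PROOFS =====

-- per-index mirror mismatch indicator on a window w
def mF (w : List Char) (i : Nat) : Int :=
  if w.getD i ' ' = w.getD (w.length - 1 - i) ' ' then 0 else 1

lemma mF_symm (w : List Char) (i : Nat) (h : i < w.length) :
    mF w (w.length - 1 - i) = mF w i := by
  unfold mF
  have h2 : w.length - 1 - (w.length - 1 - i) = i := by omega
  rw [h2]
  simp [eq_comm]

lemma mF_mid (w : List Char) (h : w.length % 2 = 1) : mF w (w.length / 2) = 0 := by
  unfold mF
  have h2 : w.length - 1 - w.length / 2 = w.length / 2 := by omega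
  simp [h2]

lemma sum_list_range (f : Nat → Int) (n : Nat) :
    ((List.range n).map f).sum = ∑ i ∈ Finset.range n, f i := by
  induction n with
  | zero => simp
  | succ n ih => simp [List.range_succ, Finset.sum_range_succ, ih]

lemma sum_mirror (f : Nat → Int) (n : Nat)
    (hs : ∀ i, i < n → f (n - 1 - i) = f i)
    (hm : n % 2 = 1 → f (n / 2) = 0) :
    ∑ i ∈ Finset.range n, f i = 2 * ∑ i ∈ Finset.range (n / 2), f i := by
  set h := n / 2 with hh
  have hsplit : ∑ i ∈ Finset.range n, f i
      = ∑ i ∈ Finset.range h, f i + ∑ i ∈ Finset.Ico h n, f i := by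
    rw [Finset.range_eq_Ico, ← Finset.sum_Ico_consecutive f (Nat.zero_le h) (by omega), ← Finset.range_eq_Ico]
  have hico : ∑ i ∈ Finset.Ico h n, f i = ∑ j ∈ Finset.range (n - h), f (h + j) := by
    rw [Finset.sum_Ico_eq_sum_range]
  have hrefl : ∑ j ∈ Finset.range (n - h), f (h + j)
      = ∑ j ∈ Finset.range (n - h), f ((n - h) - 1 - j) := by
    apply Finset.sum_congr rfl
    intro j hj
    rw [Finset.mem_range] at hj
    have hsy := hs (h + j) (by omega)
    have e : n - 1 - (h + j) = (n - h) - 1 - j := by omega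
    rw [e] at hsy
    exact hsy.symm
  rw [hsplit, hico, hrefl, Finset.sum_range_reflect]
  rcases Nat.even_or_odd n with he | ho
  · have he2 : n % 2 = 0 := Nat.even_iff.mp he
    have : n - h = h := by omega
    rw [this]; ring
  · have hodd : n % 2 = 1 := Nat.odd_iff.mp ho
    have : n - h = h + 1 := by omega
    rw [this, Finset.sum_range_succ, hm hodd]
    ring

-- A's per-line sum as a range sum of mF over the window
lemma lineA_eq (line : String) (c : Int) (num : Int) :
    check_vert_lineA c num line =
      num + ∑ i ∈ Finset.range
        (if c ≥ 0 then line.toList.drop c.toNat else line.toList.take ((PySem.Str.len line + c).toNat)).length,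
        mF (if c ≥ 0 then line.toList.drop c.toNat else line.toList.take ((PySem.Str.len line + c).toNat)) i := by
  unfold check_vert_lineA
  by_cases hc : c ≥ 0
  · simp only [if_pos hc]
    congr 1
    rw [PySem.List.pyRange_one, List.map_map, sum_list_range]
    have hc' : c = (c.toNat : Int) := (Int.toNat_of_nonneg hc).symm
    have hL : PySem.Str.len line = (line.toList.length : Int) := by simp
    have hn : ((PySem.Str.len line - c) - 0).toNat = (line.toList.drop c.toNat).length := by
      rw [hL, hc']; simp; omega
    rw [hn]
    apply Finset.sum_congr rfl
    intro i hi
    rw [Finset.mem_range, List.length_drop] at hi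
    have hiL : c.toNat + i < line.toList.length := by omega
    have e1 : (0:Int) + ↑i + c = ((c.toNat + i : Nat) : Int) := by omega
    have e2 : (-1 : Int) - ((0:Int) + ↑i) = -(((i + 1 : Nat)) : Int) := by omega
    have g1 : PySem.Str.pyGet? line ((0:Int) + ↑i + c) = some line.toList[c.toNat + i] := by
      rw [e1, PySem.Str.pyGet?_natCast, List.getElem?_eq_getElem hiL]
    have g2 : PySem.Str.pyGet? line ((-1:Int) - ((0:Int) + ↑i)) = some line.toList[c.toNat + (line.toList.length - c.toNat - 1 - i)] := by
      rw [e2]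
      have hb : PySem.Str.pyGet? line (-(((i + 1 : Nat)) : Int)) = PySem.List.pyGet? line.toList (-(((i + 1 : Nat)) : Int)) := by
        simp [PySem.Str.pyGet?]
      rw [hb, PySem.List.pyGet?_neg_natCast line.toList (i + 1) (by omega) (by omega)]
      have eidx : line.toList.length - (i + 1) = c.toNat + (line.toList.length - c.toNat - 1 - i) := by omega
      rw [eidx, List.getElem?_eq_getElem (by omega)]
    simp only [Function.comp_apply]
    rw [g1, g2]
    unfold mF
    rw [List.length_drop]
    have d1 : (line.toList.drop c.toNat).getD i ' ' = line.toList[c.toNat + i] := by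
      rw [List.getD_eq_getElem?_getD, List.getElem?_drop, List.getElem?_eq_getElem hiL]
      rfl
    have d2 : (line.toList.drop c.toNat).getD (line.toList.length - c.toNat - 1 - i) ' '
        = line.toList[c.toNat + (line.toList.length - c.toNat - 1 - i)] := by
      rw [List.getD_eq_getElem?_getD, List.getElem?_drop, List.getElem?_eq_getElem (by omega)]
      rfl
    rw [d1, d2]
    simp [beq_iff_eq]
  · simp only [if_neg hc]
    have hL : PySem.Str.len line = (line.toList.length : Int) := by simp
    rw [hL]
    congr 1
    rw [PySem.List.pyRange_one, List.map_map, sum_list_range]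
    have hm : (((line.toList.length : Int) + c) - 0).toNat
        = (line.toList.take ((line.toList.length : Int) + c).toNat).length := by
      rw [List.length_take]; omega
    rw [hm]
    apply Finset.sum_congr rfl
    intro i hi
    rw [Finset.mem_range, List.length_take] at hi
    set m := (((line.toList.length : Int)) + c).toNat with hmm
    have him : i < m := by omega
    have hiL : i < line.toList.length := by omega
    have e1 : (0:Int) + ↑i = ((i : Nat) : Int) := by omega
    have e2 : (-1 : Int) - ((0:Int) + ↑i) + c = -(((i + 1 + (-c).toNat : Nat)) : Int) := by omega
    have g1 : PySem.Str.pyGet? line ((0:Int) + ↑i) = some line.toList[i] := by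
      rw [e1, PySem.Str.pyGet?_natCast, List.getElem?_eq_getElem hiL]
    have g2 : PySem.Str.pyGet? line ((-1:Int) - ((0:Int) + ↑i) + c) = some line.toList[m - 1 - i] := by
      rw [e2]
      have hb : PySem.Str.pyGet? line (-(((i + 1 + (-c).toNat : Nat)) : Int))
          = PySem.List.pyGet? line.toList (-(((i + 1 + (-c).toNat : Nat)) : Int)) := by
        simp [PySem.Str.pyGet?]
      rw [hb, PySem.List.pyGet?_neg_natCast line.toList (i + 1 + (-c).toNat) (by omega) (by omega)]
      have eidx : line.toList.length - (i + 1 + (-c).toNat) = m - 1 - i := by omega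
      rw [eidx, List.getElem?_eq_getElem (by omega)]
    simp only [Function.comp_apply]
    rw [g1, g2]
    unfold mF
    have hlen2 : (line.toList.take m).length = m := by rw [List.length_take]; omega
    rw [hlen2]
    have d1 : (line.toList.take m).getD i ' ' = line.toList[i] := by
      rw [List.getD_eq_getElem?_getD, List.getElem?_take_of_lt him, List.getElem?_eq_getElem hiL]
      rfl
    have d2 : (line.toList.take m).getD (m - 1 - i) ' ' = line.toList[m - 1 - i] := by
      rw [List.getD_eq_getElem?_getD, List.getElem?_take_of_lt (by omega), List.getElem?_eq_getElem (by omega)]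
      rfl
    rw [d1, d2]
    simp [beq_iff_eq]

-- B's zip over the two half-windows, as a half-range sum of mF
lemma zipsum (wd : List Char) :
    (((wd.take (wd.length / 2)).zip ((wd.drop (wd.length / 2)).reverse)).map
        (fun p => if p.1 == p.2 then (0:Int) else 1)).sum
      = ∑ i ∈ Finset.range (wd.length / 2), mF wd i := by
  rw [← sum_list_range]
  congr 1
  apply List.ext_getElem
  · simp; omega
  · intro i h1 h2
    simp only [List.getElem_map, List.getElem_zip, List.getElem_range]
    have hn : i < wd.length / 2 := by simpa using h2
    have hrl : ((wd.drop (wd.length / 2)).reverse).length = wd.length - wd.length / 2 := by simp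
    have hget : ((wd.drop (wd.length / 2)).reverse)[i]'(by simp; omega) = wd[wd.length - 1 - i]'(by omega) := by
      rw [List.getElem_reverse, List.getElem_drop]
      have h3 : (wd.drop (wd.length / 2)).length - 1 - i = wd.length - 1 - i - wd.length / 2 := by
        simp; omega
      have h4 : wd.length / 2 + (wd.length - 1 - i - wd.length / 2) = wd.length - 1 - i := by omega
      congr 1
      rw [h3, h4]
    rw [List.getElem_take, hget]
    unfold mF
    have d1 : wd.getD i ' ' = wd[i]'(by omega) := by
      rw [List.getD_eq_getElem?_getD, List.getElem?_eq_getElem (by omega)]; rfl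
    have d2 : wd.getD (wd.length - 1 - i) ' ' = wd[wd.length - 1 - i]'(by omega) := by
      rw [List.getD_eq_getElem?_getD, List.getElem?_eq_getElem (by omega)]; rfl
    rw [d1, d2]
    simp [beq_iff_eq]

-- B's per-line count as a half-range sum of mF over the same window
lemma lineB_eq (line : String) (c : Int) (tot : Int) :
    check_vert_lineB c tot line =
      tot + ∑ i ∈ Finset.range
        ((if c ≥ 0 then line.toList.drop c.toNat else line.toList.take ((PySem.Str.len line + c).toNat)).length / 2),
        mF (if c ≥ 0 then line.toList.drop c.toNat else line.toList.take ((PySem.Str.len line + c).toNat)) i := by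
  unfold check_vert_lineB
  by_cases hc : c ≥ 0
  · simp only [if_pos hc]
    have hc' : c = (c.toNat : Int) := (Int.toNat_of_nonneg hc).symm
    have hsl : PySem.List.slice line.toList (some c) none = line.toList.drop c.toNat := by
      rw [hc', PySem.List.slice_from_natCast]
      congr 1
    rw [hsl, zipsum]
  · simp only [if_neg hc]
    have hmx : max (PySem.Str.len line + c) 0 = (((PySem.Str.len line + c).toNat : Nat) : Int) := by
      rw [Int.toNat_eq_max]
    have hsl : PySem.List.slice line.toList none (some (max (PySem.Str.len line + c) 0))
        = line.toList.take ((PySem.Str.len line + c).toNat) := by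
      rw [hmx, PySem.List.slice_to_natCast]
    rw [hsl, zipsum]

lemma line_double (line : String) (c num tot : Int) :
    check_vert_lineA c num line - num = 2 * (check_vert_lineB c tot line - tot) := by
  rw [lineA_eq, lineB_eq]
  set w := (if c ≥ 0 then line.toList.drop c.toNat else line.toList.take ((PySem.Str.len line + c).toNat)) with hw
  have H := sum_mirror (mF w) w.length
    (fun i hi => mF_symm w i hi) (fun h => mF_mid w h)
  omega

lemma foldl_double (c : Int) (bs : List String) :
    ∀ (a b : Int), a = 2 * b →
      bs.foldl (check_vert_lineA c) a = 2 * bs.foldl (check_vert_lineB c) b := by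
  induction bs with
  | nil => intro a b h; simpa using h
  | cons l t ih =>
    intro a b h
    simp only [List.foldl_cons]
    apply ih
    have := line_double l c a b
    omega

-- ===== VERDICT (by name: the statement is the Claim_ definition above) =====
theorem check_vert_spec : Claim_equal_check_vert := by
  intro block c _ hpre
  unfold Spec_check_vert check_vert check_vert_alt
  split
  · rfl
  · have h2 := foldl_double c block 0 0 (by ring)
    rw [h2]
    rw [PySem.Int.floordiv_eq_ediv_of_pos (by omega)]
    omega
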